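-- pv_equiv track=rewrite | github.com/iivanoo/app-evolution-toolkit | SP2/InferTool.py | rewriteSpacesInProjectName
-- ===== SOURCE A (Python) =====
-- def rewriteSpacesInProjectName(appName):
--     splitApp = appName.split(" ")
--     numberOfWords = len(splitApp)
--     if numberOfWords <= 1:
--         return appName
--     else:
--         newString = ""
--         for i in range(numberOfWords):
--             if i != (numberOfWords - 1):
--                 newString = newString + splitApp[i] + "\ "
--             else:
--                 newString = newString + splitApp[i] + " "
--         return newString
-- ===== SOURCE B (Python) =====
-- def rewriteSpacesInProjectName(appName):
--     if " " not in appName: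
--         return appName
--     return appName.replace(" ", "\\ ") + " "
-- ===== Notes on version B (the rewrite author's own statement) =====
-- stated objective: idiomatic
-- what changed: B drops the split-into-words list and the index-based rebuild loop: it passes strings without any space through unchanged and otherwise does a single character-level substitution (each space becomes backslash-space via str.replace) and appends the trailing space A's last loop iteration adds.
import Mathlib
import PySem

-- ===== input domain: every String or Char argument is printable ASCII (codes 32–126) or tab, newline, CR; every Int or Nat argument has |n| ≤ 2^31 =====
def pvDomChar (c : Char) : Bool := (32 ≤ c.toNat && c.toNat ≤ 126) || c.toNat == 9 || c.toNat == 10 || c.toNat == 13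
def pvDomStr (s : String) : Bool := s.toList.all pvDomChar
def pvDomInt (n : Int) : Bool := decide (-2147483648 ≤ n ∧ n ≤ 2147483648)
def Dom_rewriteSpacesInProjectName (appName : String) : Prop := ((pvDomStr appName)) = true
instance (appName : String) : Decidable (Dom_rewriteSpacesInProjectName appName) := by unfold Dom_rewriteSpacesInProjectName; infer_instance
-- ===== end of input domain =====

-- B replaces A's split-list + index loop by a no-space passthrough and a single str.replace plus a trailing space (idiomatic; same cost).


-- ===== PORT A =====
def rewriteSpacesInProjectName (appName : String) : String :=
  let splitApp := PySem.Chars.splitOn appName.toList [' ']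
  let numberOfWords : Int := splitApp.length
  if numberOfWords ≤ 1 then appName
  else
    String.ofList ((PySem.List.pyRange 0 numberOfWords 1).foldl
      (fun newString i =>
        if i ≠ numberOfWords - 1 then newString ++ PySem.List.pyGetD splitApp i [] ++ ['\\', ' ']
        else newString ++ PySem.List.pyGetD splitApp i [] ++ [' ']) [])

-- ===== PORT B =====
def rewriteSpacesInProjectName_alt (appName : String) : String :=
  if PySem.Str.isIn " " appName = false then appName
  else String.ofList (PySem.Chars.replace appName.toList [' '] ['\\', ' '] ++ [' '])

-- ===== PRECONDITION & SPEC =====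
def Spec_rewriteSpacesInProjectName (appName : String) (out : String) : Prop := out = rewriteSpacesInProjectName_alt appName
instance (appName : String) (out : String) : Decidable (Spec_rewriteSpacesInProjectName appName out) := by unfold Spec_rewriteSpacesInProjectName; infer_instance

-- ===== CLAIM (what is proved, stated in full; the proofs are below) =====
def Claim_equal_rewriteSpacesInProjectName : Prop := ∀ (appName : String), Dom_rewriteSpacesInProjectName appName → Spec_rewriteSpacesInProjectName appName (rewriteSpacesInProjectName appName)

-- ===== LEMMAS AND PROOFS =====

-- spine of splitOn on the single-char separator ' ' (proof-only model)
def pvSplitSp : List Char → List (List Char)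
  | [] => [[]]
  | c :: t =>
    let r := pvSplitSp t
    if c = ' ' then [] :: r else (c :: r.headI) :: r.tail

-- model of replace with old = [' '] (proof-only)
def pvRep (nw : List Char) : List Char → List Char
  | [] => []
  | c :: t => if c = ' ' then nw ++ pvRep nw t else c :: pvRep nw t

-- join with separator nw, never empty input (proof-only)
def pvJoin (nw : List Char) : List (List Char) → List Char
  | [] => []
  | [p] => p
  | p :: ps => p ++ nw ++ pvJoin nw ps

theorem pvSplitSp_ne_nil (cs : List Char) : pvSplitSp cs ≠ [] := by
  cases cs with
  | nil => simp [pvSplitSp]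
  | cons c t => simp only [pvSplitSp]; split_ifs <;> simp

theorem splitOn_go_eq (fuel : Nat) : ∀ (l cur : List Char) (acc : List (List Char)),
    l.length ≤ fuel →
    PySem.Chars.splitOn.go [' '] fuel l cur acc
      = acc.reverse ++ ((cur.reverse ++ (pvSplitSp l).headI) :: (pvSplitSp l).tail) := by
  induction fuel with
  | zero =>
    intro l cur acc h
    have : l = [] := List.length_eq_zero_iff.mp (Nat.le_zero.mp h)
    subst this
    simp [PySem.Chars.splitOn.go, pvSplitSp]
  | succ f ih =>
    intro l cur acc h
    cases l with
    | nil => simp [PySem.Chars.splitOn.go, pvSplitSp]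
    | cons c rest =>
      rw [PySem.Chars.splitOn.go]
      by_cases hc : c = ' '
      · subst hc
        simp only [List.isPrefixOf, beq_self_eq_true, Bool.true_and, if_pos]
        rw [show List.drop [' '].length (' ' :: rest) = rest from rfl]
        rw [ih rest [] (cur.reverse :: acc) (by simpa using Nat.lt_succ_iff.mp (by simpa using h))]
        obtain ⟨p, ps, hps⟩ := List.exists_cons_of_ne_nil (pvSplitSp_ne_nil rest)
        simp [pvSplitSp, hps]
      · have hpre : [' '].isPrefixOf (c :: rest) = false := by
          simp [List.isPrefixOf]
          intro hcc; exact hc hcc.symm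
        rw [if_neg (by simp [hpre])]
        rw [ih rest (c :: cur) acc (by simpa using Nat.lt_succ_iff.mp (by simpa using h))]
        have hne := pvSplitSp_ne_nil rest
        obtain ⟨p, ps, hps⟩ := List.exists_cons_of_ne_nil hne
        simp [pvSplitSp, hc, hps]

theorem splitOn_eq_sp (cs : List Char) : PySem.Chars.splitOn cs [' '] = pvSplitSp cs := by
  have h := splitOn_go_eq (cs.length + 1) cs [] [] (by omega)
  rw [PySem.Chars.splitOn, h]
  have hne := pvSplitSp_ne_nil cs
  obtain ⟨p, ps, hps⟩ := List.exists_cons_of_ne_nil hne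
  simp [hps]

theorem replace_go_eq (nw : List Char) (fuel : Nat) : ∀ (l acc : List Char),
    l.length ≤ fuel →
    PySem.Chars.replace.go [' '] nw fuel l acc = acc.reverse ++ pvRep nw l := by
  induction fuel with
  | zero =>
    intro l acc h
    have : l = [] := List.length_eq_zero_iff.mp (Nat.le_zero.mp h)
    subst this
    simp [PySem.Chars.replace.go, pvRep]
  | succ f ih =>
    intro l acc h
    cases l with
    | nil => simp [PySem.Chars.replace.go, pvRep]
    | cons c rest =>
      rw [PySem.Chars.replace.go]
      by_cases hc : c = ' '
      · subst hc
        simp only [List.isPrefixOf, beq_self_eq_true, Bool.true_and, if_pos]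
        rw [show List.drop [' '].length (' ' :: rest) = rest from rfl]
        rw [ih rest (nw.reverse ++ acc) (by simpa using Nat.lt_succ_iff.mp (by simpa using h))]
        simp [pvRep]
      · have hpre : [' '].isPrefixOf (c :: rest) = false := by
          simp [List.isPrefixOf]
          intro hcc; exact hc hcc.symm
        rw [if_neg (by simp [hpre])]
        rw [ih rest (c :: acc) (by simpa using Nat.lt_succ_iff.mp (by simpa using h))]
        simp [pvRep, hc]

theorem replace_eq_rep (cs nw : List Char) :
    PySem.Chars.replace cs [' '] nw = pvRep nw cs := by
  rw [PySem.Chars.replace, if_neg (by simp), replace_go_eq nw cs.length cs [] le_rfl]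
  simp

-- rep equals join of the split spine
theorem rep_eq_join (nw : List Char) (cs : List Char) :
    pvRep nw cs = pvJoin nw (pvSplitSp cs) := by
  induction cs with
  | nil => simp [pvRep, pvSplitSp, pvJoin]
  | cons c t ih =>
    obtain ⟨p, ps, hps⟩ := List.exists_cons_of_ne_nil (pvSplitSp_ne_nil t)
    by_cases hc : c = ' '
    · subst hc
      simp only [pvRep, pvSplitSp, ih, hps]
      cases ps <;> simp [pvJoin]
    · simp only [pvRep, pvSplitSp, if_neg hc, ih, hps]
      cases ps <;> simp [pvJoin]

-- if no space, the spine is a single piece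
theorem sp_of_not_mem (cs : List Char) (h : ' ' ∉ cs) : pvSplitSp cs = [cs] := by
  induction cs with
  | nil => simp [pvSplitSp]
  | cons c t ih =>
    have hc : c ≠ ' ' := fun hc => h (hc ▸ List.mem_cons_self)
    have ht : ' ' ∉ t := fun ht => h (List.mem_cons_of_mem _ ht)
    simp [pvSplitSp, hc, ih ht]

-- if a space occurs, the spine has at least two pieces
theorem two_le_sp_of_mem (cs : List Char) (h : ' ' ∈ cs) : 2 ≤ (pvSplitSp cs).length := by
  induction cs with
  | nil => simp at h
  | cons c t ih =>
    by_cases hc : c = ' '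
    · have h1 : 0 < (pvSplitSp t).length := List.length_pos_of_ne_nil (pvSplitSp_ne_nil t)
      simp [pvSplitSp, hc]
      omega
    · have ht : ' ' ∈ t := by
        rcases List.mem_cons.mp h with h1 | h1
        · exact absurd h1.symm hc
        · exact h1
      obtain ⟨p, ps, hps⟩ := List.exists_cons_of_ne_nil (pvSplitSp_ne_nil t)
      have := ih ht
      simp [pvSplitSp, hc, hps] at this ⊢
      omega

theorem join_append_singleton (nw : List Char) (ps : List (List Char)) (p : List Char) :
    pvJoin nw (ps ++ [p]) = ps.flatMap (fun w => w ++ nw) ++ p := by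
  induction ps with
  | nil => simp [pvJoin]
  | cons q qs ih =>
    cases qs with
    | nil => simp [pvJoin]
    | cons r rs => simp [pvJoin] at ih ⊢; simp [ih]

-- A's indexed loop over the words, evaluated on parts = ps ++ [p]
theorem loopA_eq (ps : List (List Char)) (p : List Char) (init : List Char) :
    (PySem.List.pyRange 0 (((ps ++ [p]).length : Nat) : Int) 1).foldl
      (fun newString i =>
        if i ≠ (((ps ++ [p]).length : Nat) : Int) - 1 then
          newString ++ PySem.List.pyGetD (ps ++ [p]) i [] ++ ['\\', ' ']
        else newString ++ PySem.List.pyGetD (ps ++ [p]) i [] ++ [' ']) init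
    = init ++ ps.flatMap (fun w => w ++ ['\\', ' ']) ++ p ++ [' '] := by
  have hlen : (((ps ++ [p]).length : Nat) : Int) = (ps.length : Int) + 1 := by
    simp
  rw [hlen, PySem.List.pyRange_one_succ_right (by positivity), List.foldl_append]
  have hmid : ∀ (acc : List Char),
      (PySem.List.pyRange 0 (ps.length : Int) 1).foldl
        (fun newString i =>
          if i ≠ (ps.length : Int) + 1 - 1 then
            newString ++ PySem.List.pyGetD (ps ++ [p]) i [] ++ ['\\', ' ']
          else newString ++ PySem.List.pyGetD (ps ++ [p]) i [] ++ [' ']) acc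
      = ps.foldl (fun newString w => newString ++ w ++ ['\\', ' ']) acc := by
    intro acc
    rw [PySem.List.foldl_congr_mem (g := fun newString i =>
        newString ++ PySem.List.pyGetD ps i [] ++ ['\\', ' '])]
    · exact PySem.List.foldl_pyRange_zero_pyGetD' ps []
        (fun newString w => newString ++ w ++ ['\\', ' ']) acc
    · intro b i hi
      rw [PySem.List.mem_pyRange_one] at hi
      have h1 : i ≠ (ps.length : Int) + 1 - 1 := by omega
      rw [if_pos h1]
      have h2 : PySem.List.pyGetD (ps ++ [p]) i [] = PySem.List.pyGetD ps i [] := by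
        have h0 := hi.1
        have hlt := hi.2
        rw [PySem.List.pyGetD_eq_getElem (ps ++ [p]) [] h0 (by simp; omega),
            PySem.List.pyGetD_eq_getElem ps [] h0 hlt]
        exact List.getElem_append_left (by omega)
      rw [h2]
  rw [hmid]
  rw [PySem.List.foldl_congr_mem ps _ (fun acc w => acc ++ (w ++ ['\\', ' '])) _
        (by intro acc x _; simp),
      PySem.List.foldl_append_eq_flatMap]
  have hlast : PySem.List.pyGetD (ps ++ [p]) (ps.length : Int) [] = p := by
    rw [PySem.List.pyGetD_eq_getElem (ps ++ [p]) [] (by positivity) (by simp)]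
    simp
  simp [hlast]

-- singleton substring test = membership
theorem isIn_singleton_iff (c : Char) (cs : List Char) :
    PySem.Chars.isIn [c] cs = true ↔ c ∈ cs := by
  rw [PySem.Chars.isIn_iff_infix]
  constructor
  · rintro ⟨s, t, rfl⟩; simp
  · intro h
    obtain ⟨s, t, rfl⟩ := List.append_of_mem h
    exact ⟨s, t, by simp⟩

-- ===== VERDICT (by name: the statement is the Claim_ definition above) =====
theorem rewriteSpacesInProjectName_spec : Claim_equal_rewriteSpacesInProjectName := by
  intro appName _
  unfold Spec_rewriteSpacesInProjectName rewriteSpacesInProjectName rewriteSpacesInProjectName_alt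
  simp only [splitOn_eq_sp]
  have hsep : ((" " : String).toList) = [' '] := by decide
  by_cases hmem : ' ' ∈ appName.toList
  · have h2 := two_le_sp_of_mem appName.toList hmem
    have hInC : PySem.Chars.isIn [' '] appName.toList = true :=
      (isIn_singleton_iff ' ' appName.toList).mpr hmem
    rw [if_neg (by omega),
        if_neg (by rw [PySem.Str.isIn, hsep]; simp [hInC])]
    obtain ⟨qs, p, hqs⟩ := (List.eq_nil_or_concat (pvSplitSp appName.toList)).resolve_left
      (pvSplitSp_ne_nil appName.toList)
    rw [List.concat_eq_append] at hqs
    rw [hqs, loopA_eq, replace_eq_rep, rep_eq_join, hqs, join_append_singleton]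
    simp
  · have hsp := sp_of_not_mem appName.toList hmem
    have hInC : PySem.Chars.isIn [' '] appName.toList = false := by
      rcases Bool.eq_false_or_eq_true (PySem.Chars.isIn [' '] appName.toList) with h | h
      · exact absurd ((isIn_singleton_iff ' ' appName.toList).mp h) hmem
      · exact h
    rw [hsp]
    rw [if_pos (by norm_num), if_pos (by rw [PySem.Str.isIn, hsep]; exact hInC)]
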